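-- pv_equiv track=rewrite | github.com/Chirag945/TESTREPO | code-decom/javasemantic.py | extract_component_names_with_counts
-- ===== SOURCE A (Python) =====
-- def extract_component_names_with_counts(json_response):
--     """
--     Extracts component names from the JSON response of JavaCodeExtractor
--     and returns them in a structured format along with counts.
--
--     Args:
--         json_response (dict): JSON response from JavaCodeExtractor
--
--     Returns:
--         tuple: (List of components, Dictionary of component counts)
--     """
--     components = []
--     component_counts = {
--         "classes": 0,
--         "interfaces": 0,
--         "methods": 0,
--         "constructors": 0,
--         "fields": 0
--     }
--
--     # Process Classes
--     for class_info in json_response.get('classes', []):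
--         components.append({'type': 'class', 'name': class_info.get('class_name', '')})
--         component_counts["classes"] += 1
--
--     # Process Interfaces
--     for interface in json_response.get('interfaces', []):
--         components.append({'type': 'interface', 'name': interface.get('interface_name', '')})
--         component_counts["interfaces"] += 1
--
--     # Process Methods
--     for method in json_response.get('methods', []):
--         components.append({'type': 'method', 'name': method.get('method_name', '')})
--         component_counts["methods"] += 1
--
--     # Process Constructors
--     for constructor in json_response.get('constructors', []):
--         components.append({'type': 'constructor', 'name': constructor.get('constructor_name', '')})
--         component_counts["constructors"] += 1
--
--     # Process Fields
--     for field in json_response.get('fields', []):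
--         components.append({'type': 'field', 'name': field.get('field_name', '')})
--         component_counts["fields"] += 1
--
--     return components, component_counts
-- ===== SOURCE B (Python) =====
-- # B builds the components list by recursion over the category specs, then derives
-- # the counts in a SECOND pass by counting type labels in the built components list
-- # (counts come from the output, not the input); objective: alternative decomposition.
-- _CATEGORIES = [
--     ("classes", "class", "class_name"),
--     ("interfaces", "interface", "interface_name"),
--     ("methods", "method", "method_name"),
--     ("constructors", "constructor", "constructor_name"),
--     ("fields", "field", "field_name"),
-- ]
--
--
-- def extract_component_names_with_counts(json_response):
--     def build(i):
--         if i == len(_CATEGORIES):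
--             return []
--         key, label, field = _CATEGORIES[i]
--         return [{'type': label, 'name': item.get(field, '')}
--                 for item in json_response.get(key, [])] + build(i + 1)
--
--     components = build(0)
--     component_counts = {
--         key: sum(1 for comp in components if comp['type'] == label)
--         for key, label, _ in _CATEGORIES
--     }
--     return components, component_counts
-- ===== Notes on version B (the rewrite author's own statement) =====
-- stated objective: alternative
-- what changed: A makes five copy-pasted input passes that append components and increment a pre-initialised counts dict in lockstep; B first builds the components list alone by recursion over the category specs, then computes the counts in a separate second pass by counting each type label in the built components list, so counts are derived from the output rather than tallied from the input.
import Mathlib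
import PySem

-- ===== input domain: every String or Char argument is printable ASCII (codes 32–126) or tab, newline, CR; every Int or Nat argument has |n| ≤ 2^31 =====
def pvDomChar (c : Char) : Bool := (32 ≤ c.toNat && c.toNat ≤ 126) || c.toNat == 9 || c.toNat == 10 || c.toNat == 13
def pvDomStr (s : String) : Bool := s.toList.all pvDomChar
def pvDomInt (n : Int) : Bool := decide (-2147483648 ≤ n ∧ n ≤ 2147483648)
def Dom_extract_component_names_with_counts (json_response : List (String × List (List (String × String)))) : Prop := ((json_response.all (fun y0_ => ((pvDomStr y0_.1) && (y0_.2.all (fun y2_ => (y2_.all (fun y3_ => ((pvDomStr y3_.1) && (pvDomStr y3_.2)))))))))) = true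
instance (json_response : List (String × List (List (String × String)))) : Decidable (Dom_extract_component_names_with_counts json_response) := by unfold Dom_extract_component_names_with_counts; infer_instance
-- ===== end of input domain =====

-- B builds the components by recursion over the category specs and then derives the counts
-- in a second pass counting type labels in the built components (objective: alternative).
-- Return-value equivalence only; neither version mutates its input.

-- dict.get(k, dflt) on an association list (first match), used by both ports.
def pvGetD {α : Type} (l : List (String × α)) (k : String) (dflt : α) : α :=
  match l.find? (fun p => p.1 == k) with
  | some p => p.2
  | none => dflt

-- ===== PORT A =====
def extract_component_names_with_counts (json_response : List (String × List (List (String × String)))) : (List (List (String × String))) × (List (String × Int)) :=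
  let components : List (List (String × String)) := []
  let component_counts : PySem.Dict String Int :=
    (((((PySem.Dict.empty.insert "classes" 0).insert "interfaces" 0).insert "methods" 0).insert "constructors" 0).insert "fields" 0)
  -- Process Classes
  let st := (pvGetD json_response "classes" []).foldl
    (fun st class_info => (st.1 ++ [[("type", "class"), ("name", pvGetD class_info "class_name" "")]],
                           st.2.modify "classes" 0 (· + 1))) (components, component_counts)
  -- Process Interfaces
  let st := (pvGetD json_response "interfaces" []).foldl
    (fun st interface => (st.1 ++ [[("type", "interface"), ("name", pvGetD interface "interface_name" "")]],
                          st.2.modify "interfaces" 0 (· + 1))) st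
  -- Process Methods
  let st := (pvGetD json_response "methods" []).foldl
    (fun st method => (st.1 ++ [[("type", "method"), ("name", pvGetD method "method_name" "")]],
                       st.2.modify "methods" 0 (· + 1))) st
  -- Process Constructors
  let st := (pvGetD json_response "constructors" []).foldl
    (fun st constructor => (st.1 ++ [[("type", "constructor"), ("name", pvGetD constructor "constructor_name" "")]],
                            st.2.modify "constructors" 0 (· + 1))) st
  -- Process Fields
  let st := (pvGetD json_response "fields" []).foldl
    (fun st field => (st.1 ++ [[("type", "field"), ("name", pvGetD field "field_name" "")]],
                      st.2.modify "fields" 0 (· + 1))) st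
  (st.1, st.2.items)

-- ===== PORT B =====
-- the category specs (json_key, type_label, name_field)
def pvCategories : List (String × String × String) :=
  [("classes", "class", "class_name"),
   ("interfaces", "interface", "interface_name"),
   ("methods", "method", "method_name"),
   ("constructors", "constructor", "constructor_name"),
   ("fields", "field", "field_name")]

-- build(i): recursion over the remaining category specs
def pvBuild (json_response : List (String × List (List (String × String)))) : List (String × String × String) → List (List (String × String))
  | [] => []
  | s :: rest =>
      (pvGetD json_response s.1 []).map
        (fun item => [("type", s.2.1), ("name", pvGetD item s.2.2 "")])
      ++ pvBuild json_response rest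

def extract_component_names_with_counts_alt (json_response : List (String × List (List (String × String)))) : (List (List (String × String))) × (List (String × Int)) :=
  let components := pvBuild json_response pvCategories
  (components,
   pvCategories.map (fun s =>
     (s.1, (components.countP (fun comp => pvGetD comp "type" "" == s.2.1) : Int))))

-- ===== PRECONDITION & SPEC =====
def Spec_extract_component_names_with_counts (json_response : List (String × List (List (String × String)))) (out : (List (List (String × String))) × (List (String × Int))) : Prop := out = extract_component_names_with_counts_alt json_response
instance (json_response : List (String × List (List (String × String)))) (out : (List (List (String × String))) × (List (String × Int))) : Decidable (Spec_extract_component_names_with_counts json_response out) := by unfold Spec_extract_component_names_with_counts; infer_instance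

-- ===== CLAIM (what is proved, stated in full; the proofs are below) =====
def Claim_equal_extract_component_names_with_counts : Prop := ∀ (json_response : List (String × List (List (String × String)))), Dom_extract_component_names_with_counts json_response → Spec_extract_component_names_with_counts json_response (extract_component_names_with_counts json_response)

-- ===== LEMMAS AND PROOFS =====

-- A's per-category loop with pair state splits into the appended map and the counts fold.
theorem pv_pairFold (l : List (List (String × String))) (f : List (String × String) → List (String × String))
    (k : String) (acc : List (List (String × String))) (d : PySem.Dict String Int) :
    l.foldl (fun st x => (st.1 ++ [f x], st.2.modify k 0 (· + 1))) (acc, d)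
    = (acc ++ l.map f, l.foldl (fun d (_ : List (String × String)) => d.modify k 0 (· + 1)) d) := by
  induction l generalizing acc d with
  | nil => simp
  | cons x xs ih => simp [List.foldl_cons, ih]

-- counting fold with constant key: lookup characterisation.
theorem pv_getD_foldl_const (l : List (List (String × String))) (k k' : String) (d : PySem.Dict String Int) :
    (l.foldl (fun d (_ : List (String × String)) => d.modify k 0 (· + 1)) d).getD k' 0
    = d.getD k' 0 + (if k' = k then (l.length : Int) else 0) := by
  induction l generalizing d with
  | nil => simp
  | cons x xs ih =>
      simp only [List.foldl_cons, ih, PySem.Dict.getD_modify, List.length_cons]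
      split_ifs with h
      · subst h; push_cast; ring
      · ring

-- counting fold with constant key keeps every already-present key present.
theorem pv_contains_foldl_const (l : List (List (String × String))) (k k' : String) (d : PySem.Dict String Int)
    (h : d.contains k' = true) :
    (l.foldl (fun d (_ : List (String × String)) => d.modify k 0 (· + 1)) d).contains k' = true := by
  induction l generalizing d with
  | nil => exact h
  | cons x xs ih => exact ih _ (by simp [PySem.Dict.contains_modify, h])

-- counting fold with constant key preserves the key list when the key is present.
theorem pv_keys_foldl_const (l : List (List (String × String))) (k : String) (d : PySem.Dict String Int)
    (h : d.contains k = true) :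
    (l.foldl (fun d (_ : List (String × String)) => d.modify k 0 (· + 1)) d).keys = d.keys := by
  induction l generalizing d with
  | nil => rfl
  | cons x xs ih =>
      simp only [List.foldl_cons]
      rw [ih _ (by simp [PySem.Dict.contains_modify, h]),
          PySem.Dict.keys_modify, PySem.Dict.keys_insert_of_contains _ _ h]

-- counting a fixed type label over one category's mapped components.
theorem pv_countP_map (l : List (List (String × String))) (lab lab' : String)
    (g : List (String × String) → String) :
    (l.map (fun item => [("type", lab), ("name", g item)])).countP
      (fun c => pvGetD c "type" "" == lab')
    = if lab = lab' then l.length else 0 := by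
  rw [List.countP_map]
  have hfun : ((fun c => pvGetD c "type" "" == lab') ∘ fun item => [("type", lab), ("name", g item)])
      = fun _ => (lab == lab') := by
    funext x; simp [pvGetD, List.find?]
  rw [hfun]
  by_cases h : lab = lab'
  · simp [h, List.countP_true]
  · simp [beq_eq_false_iff_ne.mpr h, h, List.countP_false]

theorem extract_spec_aux (json_response : List (String × List (List (String × String)))) :
    extract_component_names_with_counts json_response
    = extract_component_names_with_counts_alt json_response := by
  unfold extract_component_names_with_counts extract_component_names_with_counts_alt
  simp only [pv_pairFold, List.nil_append, pvCategories, pvBuild, List.map_cons, List.map_nil,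
    List.append_nil]
  generalize pvGetD json_response "classes" [] = l1
  generalize pvGetD json_response "interfaces" [] = l2
  generalize pvGetD json_response "methods" [] = l3
  generalize pvGetD json_response "constructors" [] = l4
  generalize pvGetD json_response "fields" [] = l5
  refine Prod.ext ?_ ?_
  · simp [List.append_assoc]
  · -- counts side
    set d0 : PySem.Dict String Int :=
      (((((PySem.Dict.empty.insert "classes" 0).insert "interfaces" 0).insert "methods" 0).insert "constructors" 0).insert "fields" 0) with hd0
    set D1 := l1.foldl (fun d (_ : List (String × String)) => d.modify "classes" 0 (· + 1)) d0 with hD1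
    set D2 := l2.foldl (fun d (_ : List (String × String)) => d.modify "interfaces" 0 (· + 1)) D1 with hD2
    set D3 := l3.foldl (fun d (_ : List (String × String)) => d.modify "methods" 0 (· + 1)) D2 with hD3
    set D4 := l4.foldl (fun d (_ : List (String × String)) => d.modify "constructors" 0 (· + 1)) D3 with hD4
    set D5 := l5.foldl (fun d (_ : List (String × String)) => d.modify "fields" 0 (· + 1)) D4 with hD5
    have hc1 : ∀ k : String, d0.contains k = true → D1.contains k = true := fun k h => pv_contains_foldl_const _ _ _ _ h
    have hc2 : ∀ k : String, d0.contains k = true → D2.contains k = true := fun k h => pv_contains_foldl_const _ _ _ _ (hc1 k h)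
    have hc3 : ∀ k : String, d0.contains k = true → D3.contains k = true := fun k h => pv_contains_foldl_const _ _ _ _ (hc2 k h)
    have hc4 : ∀ k : String, d0.contains k = true → D4.contains k = true := fun k h => pv_contains_foldl_const _ _ _ _ (hc3 k h)
    have k5 : D5.keys = D4.keys := by rw [hD5]; exact pv_keys_foldl_const _ _ _ (hc4 _ (by decide))
    have k4 : D4.keys = D3.keys := by rw [hD4]; exact pv_keys_foldl_const _ _ _ (hc3 _ (by decide))
    have k3 : D3.keys = D2.keys := by rw [hD3]; exact pv_keys_foldl_const _ _ _ (hc2 _ (by decide))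
    have k2 : D2.keys = D1.keys := by rw [hD2]; exact pv_keys_foldl_const _ _ _ (hc1 _ (by decide))
    have k1 : D1.keys = d0.keys := by rw [hD1]; exact pv_keys_foldl_const _ _ _ (by decide)
    have hkeys : D5.keys = ["classes", "interfaces", "methods", "constructors", "fields"] := by
      rw [k5, k4, k3, k2, k1, hd0]; decide
    have hnd : D5.keys.Nodup := by rw [hkeys]; decide
    rw [PySem.Dict.items_eq_map_keys D5 hnd 0, hkeys]
    have hget : ∀ k : String, D5.getD k 0 =
        d0.getD k 0
        + (if k = "classes" then (l1.length : Int) else 0)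
        + (if k = "interfaces" then (l2.length : Int) else 0)
        + (if k = "methods" then (l3.length : Int) else 0)
        + (if k = "constructors" then (l4.length : Int) else 0)
        + (if k = "fields" then (l5.length : Int) else 0) := by
      intro k
      rw [hD5, pv_getD_foldl_const, hD4, pv_getD_foldl_const, hD3, pv_getD_foldl_const,
          hD2, pv_getD_foldl_const, hD1, pv_getD_foldl_const]
    simp only [List.map_cons, List.map_nil, hget, List.countP_append, pv_countP_map]
    simp [hd0, PySem.Dict.getD_insert]

-- ===== VERDICT (by name: the statement is the Claim_ definition above) =====
theorem extract_component_names_with_counts_spec : Claim_equal_extract_component_names_with_counts := by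
  intro json_response _
  exact extract_spec_aux json_response
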